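-- pv_equiv track=rewrite | github.com/abby-ra/leetcode_problems | PS Practive/13.acronym.py | scronym
-- ===== SOURCE A (Python) =====
-- def scronym(s,first):
--     word = s.split()
--     acron = ""
--
--     for i in word:
--         acron += i[0].upper()
--
--     if acron == first:
--         return True
--     return False
-- ===== SOURCE B (Python) =====
-- def scronym(s, first):
--     words = s.split()
--     return len(first) == len(words) and all(
--         w[0].upper() == c for w, c in zip(words, first))
-- ===== Notes on version B (the rewrite author's own statement) =====
-- stated objective: simpler
-- what changed: B never builds the acronym string: it short-circuits on a length check and compares first letters positionally with zip/all and early exit, instead of accumulating a string in a loop and equality-testing it.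
import Mathlib
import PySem

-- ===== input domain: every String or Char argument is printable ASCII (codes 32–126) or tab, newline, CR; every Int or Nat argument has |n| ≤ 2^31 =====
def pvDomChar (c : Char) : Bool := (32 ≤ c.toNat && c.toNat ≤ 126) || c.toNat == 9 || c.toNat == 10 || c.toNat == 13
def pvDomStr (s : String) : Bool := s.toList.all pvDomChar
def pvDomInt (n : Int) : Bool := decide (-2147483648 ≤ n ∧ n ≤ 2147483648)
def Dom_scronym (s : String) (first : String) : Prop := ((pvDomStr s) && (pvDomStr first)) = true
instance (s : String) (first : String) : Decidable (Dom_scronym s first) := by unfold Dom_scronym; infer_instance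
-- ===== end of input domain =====

-- B checks length then compares first letters positionally with zip/all, instead of building the acronym string and equality-testing it (objective: simpler).


-- ===== PORT A =====
-- i[0] is total in Python here (split() yields only non-empty words); the [] branch is unreachable.
def scronymFirstUpper (w : List Char) : List Char :=
  match w with
  | [] => []
  | c :: _ => [PySem.Chars.upperChar c]

def scronym (s : String) (first : String) : Bool :=
  let word := PySem.Chars.split₀ s.toList
  let acron := word.foldl (fun acc i => acc ++ scronymFirstUpper i) ([] : List Char)
  if acron = first.toList then true else false

-- ===== PORT B =====
-- w[0].upper() == c for one word/char pair; the [] branch is unreachable (split() words are non-empty).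
def scronymPairOk (p : List Char × Char) : Bool :=
  match p.1 with
  | [] => false
  | c :: _ => PySem.Chars.upperChar c == p.2

def scronym_alt (s : String) (first : String) : Bool :=
  let words := PySem.Chars.split₀ s.toList
  first.toList.length == words.length && (words.zip first.toList).all scronymPairOk

-- ===== PRECONDITION & SPEC =====
def Spec_scronym (s : String) (first : String) (out : Bool) : Prop := out = scronym_alt s first
instance (s : String) (first : String) (out : Bool) : Decidable (Spec_scronym s first out) := by unfold Spec_scronym; infer_instance

-- ===== CLAIM (what is proved, stated in full; the proofs are below) =====
def Claim_equal_scronym : Prop := ∀ (s : String) (first : String), Dom_scronym s first → Spec_scronym s first (scronym s first)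

-- ===== LEMMAS AND PROOFS =====

-- every word produced by split() is non-empty
lemma split₀_go_ne_nil (s : List Char) : ∀ (cur : List Char) (acc : List (List Char)),
    (∀ w ∈ acc, w ≠ []) → ∀ w ∈ PySem.Chars.split₀.go s cur acc, w ≠ [] := by
  induction s with
  | nil =>
    intro cur acc hacc w hw
    simp only [PySem.Chars.split₀.go] at hw
    split at hw
    · exact hacc w (List.mem_reverse.mp hw)
    · rcases List.mem_cons.mp (List.mem_reverse.mp hw) with h | h
      · subst h
        simp_all [List.isEmpty_iff]
      · exact hacc w h
  | cons c rest ih =>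
    intro cur acc hacc w hw
    simp only [PySem.Chars.split₀.go] at hw
    split at hw
    · split at hw
      · exact ih [] acc hacc w hw
      · refine ih [] (cur.reverse :: acc) ?_ w hw
        intro v hv
        rcases List.mem_cons.mp hv with h | h
        · subst h
          simp_all [List.isEmpty_iff]
        · exact hacc v h
    · exact ih (c :: cur) acc hacc w hw

lemma split₀_ne_nil (s : List Char) : ∀ w ∈ PySem.Chars.split₀ s, w ≠ [] :=
  split₀_go_ne_nil s [] [] (by simp)

-- characterisation of "the built acronym equals f" as the length + positional check
lemma acron_eq_iff (ws : List (List Char)) (f : List Char) (h : ∀ w ∈ ws, w ≠ []) :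
    (decide (ws.flatMap scronymFirstUpper = f))
      = ((f.length == ws.length) && (ws.zip f).all scronymPairOk) := by
  induction ws generalizing f with
  | nil =>
    cases f <;> simp
  | cons w ws ih =>
    obtain ⟨c, w', rfl⟩ : ∃ c w', w = c :: w' := by
      rcases w with _ | ⟨c, w'⟩
      · exact absurd rfl (h _ (by simp))
      · exact ⟨c, w', rfl⟩
    cases f with
    | nil => simp [scronymFirstUpper]
    | cons d f' =>
      have := ih f' (fun v hv => h v (by simp [hv]))
      by_cases hc : PySem.Chars.upperChar c = d
      · simp [scronymFirstUpper, scronymPairOk, hc, ← this]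
      · simp [scronymFirstUpper, scronymPairOk, hc]

-- ===== VERDICT (by name: the statement is the Claim_ definition above) =====
theorem scronym_spec : Claim_equal_scronym := by
  intro s first _
  unfold Spec_scronym scronym scronym_alt
  simp only [PySem.List.foldl_append_eq_flatMap, List.nil_append]
  rw [show (if (PySem.Chars.split₀ s.toList).flatMap scronymFirstUpper = first.toList then true else false)
        = decide ((PySem.Chars.split₀ s.toList).flatMap scronymFirstUpper = first.toList) by
      split <;> simp_all]
  exact acron_eq_iff _ _ (split₀_ne_nil s.toList)
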